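-- pv_equiv track=rewrite | github.com/frosty865/PSA-Toolbox | tools/cisa-site-assessment/tools/regenerate_ofcs_baseline_v2.py | evaluate_gates_for_subtype
-- ===== SOURCE A (Python) =====
-- from typing import Dict, List, Tuple, Optional, Set
-- from collections import defaultdict
--
-- GATE_ORDER = ['CONTROL_EXISTS', 'CONTROL_OPERABLE', 'CONTROL_RESILIENCE']
--
-- def get_gate_for_question(question: Dict, migration_lookup: Dict[str, Dict]) -> Optional[str]:
--     """Get mapped gate for a question from migration table."""
--     question_id = question.get('element_id') or question.get('element_code')
--     if not question_id:
--         return None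
--
--     migration_info = migration_lookup.get(question_id)
--     if not migration_info:
--         return None
--
--     # Check if question is retired
--     if migration_info.get('action') == 'RETIRE':
--         return None
--
--     return migration_info.get('mapped_gate')
--
-- def evaluate_gates_for_subtype(
--     subtype_questions: List[Dict],
--     responses: Dict[str, str],
--     migration_lookup: Dict[str, Dict]
-- ) -> Tuple[Dict[str, Optional[str]], Dict[str, Dict]]:
--     """
--     Evaluate gates for a subtype, respecting gate ordering.
--
--     Returns:
--         - Dict mapping gate names to their evaluation result (YES/NO/N_A/None).
--           None means gate was skipped due to ordering.
--         - Dict mapping gate names to the question that was evaluated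
--     """
--     gate_results = {}
--     gate_questions = {}
--
--     # Group questions by gate
--     questions_by_gate = defaultdict(list)
--     for question in subtype_questions:
--         gate = get_gate_for_question(question, migration_lookup)
--         if gate:
--             questions_by_gate[gate].append(question)
--
--     # Evaluate gates in order
--     for gate in GATE_ORDER:
--         if gate not in questions_by_gate:
--             gate_results[gate] = None
--             gate_questions[gate] = None
--             continue
--
--         # Get response for this gate's question
--         gate_question = questions_by_gate[gate][0]  # Use first question if multiple
--         question_id = gate_question.get('element_id') or gate_question.get('element_code')
--         response = responses.get(question_id)
--
--         # Check if previous gate failed (skip if so)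
--         if gate == 'CONTROL_OPERABLE':
--             if gate_results.get('CONTROL_EXISTS') == 'NO':
--                 gate_results[gate] = None  # Skipped
--                 gate_questions[gate] = None
--                 continue
--         elif gate == 'CONTROL_RESILIENCE':
--             if gate_results.get('CONTROL_EXISTS') == 'NO' or gate_results.get('CONTROL_OPERABLE') == 'NO':
--                 gate_results[gate] = None  # Skipped
--                 gate_questions[gate] = None
--                 continue
--
--         # Store question for this gate
--         gate_questions[gate] = gate_question
--
--         # Evaluate gate (handle both N/A and N_A formats)
--         if response in ('N_A', 'N/A'):
--             gate_results[gate] = 'N_A'  # Excluded from scoring but recorded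
--         elif response == 'NO':
--             gate_results[gate] = 'NO'
--         elif response == 'YES':
--             gate_results[gate] = 'YES'
--         else:
--             gate_results[gate] = None  # No response
--
--     return gate_results, gate_questions
-- ===== SOURCE B (Python) =====
-- GATE_ORDER = ['CONTROL_EXISTS', 'CONTROL_OPERABLE', 'CONTROL_RESILIENCE']
--
-- def get_gate_for_question(question, migration_lookup):
--     question_id = question.get('element_id') or question.get('element_code')
--     if not question_id:
--         return None
--     migration_info = migration_lookup.get(question_id)
--     if not migration_info:
--         return None
--     if migration_info.get('action') == 'RETIRE':
--         return None
--     return migration_info.get('mapped_gate')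
--
-- def evaluate_gates_for_subtype(subtype_questions, responses, migration_lookup):
--     # Per-gate linear scan instead of a grouping pass; a running "blocked"
--     # flag replaces the dict lookups of the ordered skip logic.
--     results = {}
--     questions = {}
--     blocked = False
--     for gate in GATE_ORDER:
--         found = None
--         for cand in subtype_questions:
--             if get_gate_for_question(cand, migration_lookup) == gate:
--                 found = cand
--                 break
--         if found is None or blocked:
--             results[gate] = None
--             questions[gate] = None
--             continue
--         questions[gate] = found
--         qid = found.get('element_id') or found.get('element_code')
--         response = responses.get(qid)
--         if response in ('N_A', 'N/A'):
--             results[gate] = 'N_A'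
--         elif response == 'NO':
--             results[gate] = 'NO'
--             blocked = True
--         elif response == 'YES':
--             results[gate] = 'YES'
--         else:
--             results[gate] = None
--     return results, questions
-- ===== Notes on version B (the rewrite author's own statement) =====
-- stated objective: simpler
-- what changed: B drops the defaultdict grouping pass entirely: it iterates GATE_ORDER, linearly scanning subtype_questions for the first question mapped to each gate, and replaces the ordered-skip dict lookups with a single running 'blocked' flag set when a gate evaluates to NO.
import Mathlib
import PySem

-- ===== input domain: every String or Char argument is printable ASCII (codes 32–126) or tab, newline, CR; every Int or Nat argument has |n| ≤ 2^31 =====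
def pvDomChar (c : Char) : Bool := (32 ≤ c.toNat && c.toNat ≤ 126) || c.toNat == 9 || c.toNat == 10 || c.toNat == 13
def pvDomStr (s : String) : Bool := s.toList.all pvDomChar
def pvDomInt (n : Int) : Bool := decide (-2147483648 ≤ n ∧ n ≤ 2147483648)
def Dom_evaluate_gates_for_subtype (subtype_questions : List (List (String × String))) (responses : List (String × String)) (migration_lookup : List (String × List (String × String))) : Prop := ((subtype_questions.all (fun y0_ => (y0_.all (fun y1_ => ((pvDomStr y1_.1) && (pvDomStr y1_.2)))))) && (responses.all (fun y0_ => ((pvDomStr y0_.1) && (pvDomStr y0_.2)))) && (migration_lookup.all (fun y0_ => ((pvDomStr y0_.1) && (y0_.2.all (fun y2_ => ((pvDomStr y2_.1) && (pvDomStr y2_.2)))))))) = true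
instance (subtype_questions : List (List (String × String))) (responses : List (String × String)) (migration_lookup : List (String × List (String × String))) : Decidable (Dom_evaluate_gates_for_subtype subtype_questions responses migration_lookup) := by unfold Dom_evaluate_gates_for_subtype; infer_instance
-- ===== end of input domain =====

-- B replaces A's grouping pass + dict-based skip lookups by per-gate linear scans and a running
-- "blocked" flag; return value is proved identical (objective: simpler decomposition).

-- ===== PORT A =====
-- shared helper: Python dict lookup on an association list (first match)
def pvDget {α : Type} (l : List (String × α)) (k : String) : Option α :=
  (l.find? (fun p => p.1 == k)).map (·.2)

-- question.get('element_id') or question.get('element_code')  (Python `or`: first operand if truthy)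
def pvQid (q : List (String × String)) : Option String :=
  match pvDget q "element_id" with
  | some s => if s = "" then pvDget q "element_code" else some s
  | none => pvDget q "element_code"

-- responses.get(question_id) for a question's id (shared line of both programs)
def pvRespOf (responses : List (String × String)) (q : List (String × String)) : Option String :=
  match pvQid q with
  | some qid => pvDget responses qid
  | none => none

def get_gate_for_question (q : List (String × String)) (ml : List (String × List (String × String))) : Option String :=
  match pvQid q with
  | none => none
  | some qid =>
    if qid = "" then none
    else
      match pvDget ml qid with
      | none => none
      | some mi =>
        if mi = [] then none  -- `if not migration_info` (empty dict is falsy)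
        else if pvDget mi "action" == some "RETIRE" then none
        else pvDget mi "mapped_gate"

def GATE_ORDER : List String := ["CONTROL_EXISTS", "CONTROL_OPERABLE", "CONTROL_RESILIENCE"]

-- A's grouping loop body: defaultdict(list) append under the mapped gate, when the gate is truthy
def pvA_group (ml : List (String × List (String × String)))
    (d : PySem.Dict String (List (List (String × String)))) (q : List (String × String)) :
    PySem.Dict String (List (List (String × String))) :=
  match get_gate_for_question q ml with
  | some g => if g = "" then d else d.modify g [] (· ++ [q])
  | none => d

-- the result of the response evaluation chain (N_A/N/A, NO, YES, else None)
def pvEvalResp (response : Option String) : Option String :=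
  if response == some "N_A" || response == some "N/A" then some "N_A"
  else if response == some "NO" then some "NO"
  else if response == some "YES" then some "YES"
  else none

-- A's per-gate loop body over (gate_results, gate_questions)
def pvA_gate (responses : List (String × String))
    (d : PySem.Dict String (List (List (String × String))))
    (st : PySem.Dict String (Option String) × PySem.Dict String (Option (List (String × String))))
    (gate : String) :
    PySem.Dict String (Option String) × PySem.Dict String (Option (List (String × String))) :=
  if d.contains gate = false then
    (st.1.insert gate none, st.2.insert gate none)
  else
    match (d.getD gate []).head? with
    | none => (st.1.insert gate none, st.2.insert gate none)  -- unreachable: grouped lists are nonempty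
    | some gq =>
      let response : Option String := pvRespOf responses gq
      if gate = "CONTROL_OPERABLE" ∧ st.1.getD "CONTROL_EXISTS" none = some "NO" then
        (st.1.insert gate none, st.2.insert gate none)
      else if gate = "CONTROL_RESILIENCE" ∧
          (st.1.getD "CONTROL_EXISTS" none = some "NO" ∨ st.1.getD "CONTROL_OPERABLE" none = some "NO") then
        (st.1.insert gate none, st.2.insert gate none)
      else
        (st.1.insert gate (pvEvalResp response), st.2.insert gate (some gq))

def evaluate_gates_for_subtype (subtype_questions : List (List (String × String))) (responses : List (String × String)) (migration_lookup : List (String × List (String × String))) : (List (String × Option String)) × (List (String × Option (List (String × String)))) :=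
  let questions_by_gate := subtype_questions.foldl (pvA_group migration_lookup) PySem.Dict.empty
  let st := GATE_ORDER.foldl (pvA_gate responses questions_by_gate) (PySem.Dict.empty, PySem.Dict.empty)
  (st.1.items, st.2.items)

-- ===== PORT B =====
-- B's inner scan: first question mapped to this gate (loop with break)
def pvB_find (ml : List (String × List (String × String))) (gate : String) :
    List (List (String × String)) → Option (List (String × String))
  | [] => none
  | c :: rest =>
    if get_gate_for_question c ml == some gate then some c else pvB_find ml gate rest

-- B's per-gate loop body over (results, questions, blocked)
def pvB_gate (subtype_questions : List (List (String × String))) (responses : List (String × String))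
    (ml : List (String × List (String × String)))
    (st : PySem.Dict String (Option String) × PySem.Dict String (Option (List (String × String))) × Bool)
    (gate : String) :
    PySem.Dict String (Option String) × PySem.Dict String (Option (List (String × String))) × Bool :=
  match pvB_find ml gate subtype_questions with
  | none => (st.1.insert gate none, st.2.1.insert gate none, st.2.2)
  | some found =>
    if st.2.2 then
      (st.1.insert gate none, st.2.1.insert gate none, st.2.2)
    else
      let response : Option String := pvRespOf responses found
      if response == some "N_A" || response == some "N/A" then
        (st.1.insert gate (some "N_A"), st.2.1.insert gate (some found), false)
      else if response == some "NO" then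
        (st.1.insert gate (some "NO"), st.2.1.insert gate (some found), true)
      else if response == some "YES" then
        (st.1.insert gate (some "YES"), st.2.1.insert gate (some found), false)
      else
        (st.1.insert gate none, st.2.1.insert gate (some found), false)

def evaluate_gates_for_subtype_alt (subtype_questions : List (List (String × String))) (responses : List (String × String)) (migration_lookup : List (String × List (String × String))) : (List (String × Option String)) × (List (String × Option (List (String × String)))) :=
  let st := GATE_ORDER.foldl (pvB_gate subtype_questions responses migration_lookup)
    (PySem.Dict.empty, PySem.Dict.empty, false)
  (st.1.items, st.2.1.items)

-- ===== PRECONDITION & SPEC =====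
def Spec_evaluate_gates_for_subtype (subtype_questions : List (List (String × String))) (responses : List (String × String)) (migration_lookup : List (String × List (String × String))) (out : (List (String × Option String)) × (List (String × Option (List (String × String))))) : Prop := out = evaluate_gates_for_subtype_alt subtype_questions responses migration_lookup
instance (subtype_questions : List (List (String × String))) (responses : List (String × String)) (migration_lookup : List (String × List (String × String))) (out : (List (String × Option String)) × (List (String × Option (List (String × String))))) : Decidable (Spec_evaluate_gates_for_subtype subtype_questions responses migration_lookup out) := by unfold Spec_evaluate_gates_for_subtype; infer_instance

-- ===== CLAIM (what is proved, stated in full; the proofs are below) =====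
def Claim_equal_evaluate_gates_for_subtype : Prop := ∀ (subtype_questions : List (List (String × String))) (responses : List (String × String)) (migration_lookup : List (String × List (String × String))), Dom_evaluate_gates_for_subtype subtype_questions responses migration_lookup → Spec_evaluate_gates_for_subtype subtype_questions responses migration_lookup (evaluate_gates_for_subtype subtype_questions responses migration_lookup)


-- ===== LEMMAS AND PROOFS =====

-- B's scan finds the head of the filtered list
theorem pvB_find_eq (ml : List (String × List (String × String))) (g : String)
    (qs : List (List (String × String))) :
    pvB_find ml g qs = (qs.filter (fun q => get_gate_for_question q ml == some g)).head? := by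
  induction qs with
  | nil => rfl
  | cons c rest ih =>
    by_cases h : (get_gate_for_question c ml == some g) = true <;>
      simp [pvB_find, h, ih]

-- A's grouping dict at a nonempty gate key holds exactly the filtered questions, in order
theorem pvA_group_getD (ml : List (String × List (String × String))) (g : String) (hg : g ≠ "")
    (qs : List (List (String × String))) (d : PySem.Dict String (List (List (String × String)))) :
    (List.foldl (pvA_group ml) d qs).getD g [] =
      d.getD g [] ++ qs.filter (fun q => get_gate_for_question q ml == some g) := by
  induction qs generalizing d with
  | nil => simp
  | cons q qs ih =>
    simp only [List.foldl_cons, List.filter_cons]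
    cases hq : get_gate_for_question q ml with
    | none => simp [pvA_group, hq, ih]
    | some g' =>
      by_cases hgg : g' = ""
      · subst hgg
        have : ((some "" : Option String) == some g) = false := by
          simp [Ne.symm hg]
        simp [pvA_group, hq, this, ih]
      · by_cases h2 : g' = g
        · subst h2
          simp only [pvA_group, hq, if_neg hgg, beq_self_eq_true, if_pos, ih,
            PySem.Dict.getD_modify_self]
          simp
        · have : ((some g' : Option String) == some g) = false := by simp [h2]
          simp only [pvA_group, hq, if_neg hgg, this, Bool.false_eq_true, if_false, ih]
          simp [PySem.Dict.getD_modify, show ¬ g = g' from fun h => h2 h.symm]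

-- membership in A's grouping dict = the filtered list is nonempty
theorem pvA_group_contains (ml : List (String × List (String × String))) (g : String) (hg : g ≠ "")
    (qs : List (List (String × String))) (d : PySem.Dict String (List (List (String × String)))) :
    (List.foldl (pvA_group ml) d qs).contains g =
      (d.contains g || !(qs.filter (fun q => get_gate_for_question q ml == some g)).isEmpty) := by
  induction qs generalizing d with
  | nil => simp
  | cons q qs ih =>
    simp only [List.foldl_cons, List.filter_cons]
    cases hq : get_gate_for_question q ml with
    | none => simp [pvA_group, hq, ih]
    | some g' =>
      by_cases hgg : g' = ""
      · subst hgg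
        have : ((some "" : Option String) == some g) = false := by simp [Ne.symm hg]
        simp [pvA_group, hq, this, ih]
      · by_cases h2 : g' = g
        · subst h2
          simp [pvA_group, hq, if_neg hgg, ih, PySem.Dict.contains_modify]
        · have : ((some g' : Option String) == some g) = false := by simp [h2]
          have hne : (g == g') = false := beq_eq_false_iff_ne.mpr (fun h => h2 h.symm)
          simp [pvA_group, hq, if_neg hgg, this, ih, PySem.Dict.contains_modify, hne]

-- B's response if-chain, packaged through pvEvalResp and a "blocked" bit
theorem pvB_branches (st1 : PySem.Dict String (Option String))
    (st2 : PySem.Dict String (Option (List (String × String))))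
    (gate : String) (q : List (String × String)) (r : Option String) :
    (if r == some "N_A" || r == some "N/A" then (st1.insert gate (some "N_A"), st2.insert gate (some q), false)
     else if r == some "NO" then (st1.insert gate (some "NO"), st2.insert gate (some q), true)
     else if r == some "YES" then (st1.insert gate (some "YES"), st2.insert gate (some q), false)
     else (st1.insert gate none, st2.insert gate (some q), false))
    = (st1.insert gate (pvEvalResp r), st2.insert gate (some q), pvEvalResp r == some "NO") := by
  unfold pvEvalResp
  split_ifs with h1 h2 h3 <;> simp_all

-- ===== VERDICT (by name: the statement is the Claim_ definition above) =====
theorem evaluate_gates_for_subtype_spec : Claim_equal_evaluate_gates_for_subtype := by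
  intro sq resp ml _
  unfold Spec_evaluate_gates_for_subtype
  unfold evaluate_gates_for_subtype evaluate_gates_for_subtype_alt
  simp only [GATE_ORDER, List.foldl_cons, List.foldl_nil]
  have hc1 := pvA_group_contains ml "CONTROL_EXISTS" (by decide) sq PySem.Dict.empty
  have hc2 := pvA_group_contains ml "CONTROL_OPERABLE" (by decide) sq PySem.Dict.empty
  have hc3 := pvA_group_contains ml "CONTROL_RESILIENCE" (by decide) sq PySem.Dict.empty
  have hd1 := pvA_group_getD ml "CONTROL_EXISTS" (by decide) sq PySem.Dict.empty
  have hd2 := pvA_group_getD ml "CONTROL_OPERABLE" (by decide) sq PySem.Dict.empty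
  have hd3 := pvA_group_getD ml "CONTROL_RESILIENCE" (by decide) sq PySem.Dict.empty
  have hf1 := pvB_find_eq ml "CONTROL_EXISTS" sq
  have hf2 := pvB_find_eq ml "CONTROL_OPERABLE" sq
  have hf3 := pvB_find_eq ml "CONTROL_RESILIENCE" sq
  simp only [PySem.Dict.contains_empty, PySem.Dict.getD_empty, Bool.false_or,
    List.nil_append] at hc1 hc2 hc3 hd1 hd2 hd3
  cases hF1 : List.filter (fun q => get_gate_for_question q ml == some "CONTROL_EXISTS") sq with
  | nil =>
    rw [hF1] at hc1 hd1 hf1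
    cases hF2 : List.filter (fun q => get_gate_for_question q ml == some "CONTROL_OPERABLE") sq with
    | nil =>
      rw [hF2] at hc2 hd2 hf2
      cases hF3 : List.filter (fun q => get_gate_for_question q ml == some "CONTROL_RESILIENCE") sq with
      | nil =>
        rw [hF3] at hc3 hd3 hf3
        simp only [pvA_gate, pvB_gate, hc1, hc2, hc3, hd1, hd2, hd3, hf1, hf2, hf3, pvB_branches, PySem.Dict.getD_insert, PySem.Dict.getD_empty, List.head?_cons, List.head?_nil, List.isEmpty_cons, List.isEmpty_nil, Bool.not_true, Bool.not_false, reduceIte, String.reduceEq, true_and, and_true, false_and, and_false, if_true, if_false, or_false, false_or, true_or, or_true, eq_self_iff_true, reduceCtorEq, Option.some.injEq]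
        try simp_all [PySem.Dict.getD_insert, PySem.Dict.getD_empty]
      | cons q3 t3 =>
        rw [hF3] at hc3 hd3 hf3
        simp only [pvA_gate, pvB_gate, hc1, hc2, hc3, hd1, hd2, hd3, hf1, hf2, hf3, pvB_branches, PySem.Dict.getD_insert, PySem.Dict.getD_empty, List.head?_cons, List.head?_nil, List.isEmpty_cons, List.isEmpty_nil, Bool.not_true, Bool.not_false, reduceIte, String.reduceEq, true_and, and_true, false_and, and_false, if_true, if_false, or_false, false_or, true_or, or_true, eq_self_iff_true, reduceCtorEq, Option.some.injEq]
        try simp_all [PySem.Dict.getD_insert, PySem.Dict.getD_empty]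
    | cons q2 t2 =>
      rw [hF2] at hc2 hd2 hf2
      by_cases hb2 : pvEvalResp (pvRespOf resp q2) = some "NO"
      · have hb2b : (pvEvalResp (pvRespOf resp q2) == some "NO") = true := by simp [hb2]
        cases hF3 : List.filter (fun q => get_gate_for_question q ml == some "CONTROL_RESILIENCE") sq with
        | nil =>
          rw [hF3] at hc3 hd3 hf3
          simp only [pvA_gate, pvB_gate, hc1, hc2, hc3, hd1, hd2, hd3, hf1, hf2, hf3, pvB_branches, PySem.Dict.getD_insert, PySem.Dict.getD_empty, List.head?_cons, List.head?_nil, List.isEmpty_cons, List.isEmpty_nil, Bool.not_true, Bool.not_false, reduceIte, String.reduceEq, true_and, and_true, false_and, and_false, if_true, if_false, or_false, false_or, true_or, or_true, eq_self_iff_true, reduceCtorEq, Option.some.injEq, hb2, hb2b]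
          try simp_all [PySem.Dict.getD_insert, PySem.Dict.getD_empty]
        | cons q3 t3 =>
          rw [hF3] at hc3 hd3 hf3
          simp only [pvA_gate, pvB_gate, hc1, hc2, hc3, hd1, hd2, hd3, hf1, hf2, hf3, pvB_branches, PySem.Dict.getD_insert, PySem.Dict.getD_empty, List.head?_cons, List.head?_nil, List.isEmpty_cons, List.isEmpty_nil, Bool.not_true, Bool.not_false, reduceIte, String.reduceEq, true_and, and_true, false_and, and_false, if_true, if_false, or_false, false_or, true_or, or_true, eq_self_iff_true, reduceCtorEq, Option.some.injEq, hb2, hb2b]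
          try simp_all [PySem.Dict.getD_insert, PySem.Dict.getD_empty]
      · have hb2b : (pvEvalResp (pvRespOf resp q2) == some "NO") = false := by simp [hb2]
        cases hF3 : List.filter (fun q => get_gate_for_question q ml == some "CONTROL_RESILIENCE") sq with
        | nil =>
          rw [hF3] at hc3 hd3 hf3
          simp only [pvA_gate, pvB_gate, hc1, hc2, hc3, hd1, hd2, hd3, hf1, hf2, hf3, pvB_branches, PySem.Dict.getD_insert, PySem.Dict.getD_empty, List.head?_cons, List.head?_nil, List.isEmpty_cons, List.isEmpty_nil, Bool.not_true, Bool.not_false, reduceIte, String.reduceEq, true_and, and_true, false_and, and_false, if_true, if_false, or_false, false_or, true_or, or_true, eq_self_iff_true, reduceCtorEq, Option.some.injEq, hb2, hb2b]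
          try simp_all [PySem.Dict.getD_insert, PySem.Dict.getD_empty]
        | cons q3 t3 =>
          rw [hF3] at hc3 hd3 hf3
          simp only [pvA_gate, pvB_gate, hc1, hc2, hc3, hd1, hd2, hd3, hf1, hf2, hf3, pvB_branches, PySem.Dict.getD_insert, PySem.Dict.getD_empty, List.head?_cons, List.head?_nil, List.isEmpty_cons, List.isEmpty_nil, Bool.not_true, Bool.not_false, reduceIte, String.reduceEq, true_and, and_true, false_and, and_false, if_true, if_false, or_false, false_or, true_or, or_true, eq_self_iff_true, reduceCtorEq, Option.some.injEq, hb2, hb2b]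
          try simp_all [PySem.Dict.getD_insert, PySem.Dict.getD_empty]
  | cons q1 t1 =>
    rw [hF1] at hc1 hd1 hf1
    by_cases hb1 : pvEvalResp (pvRespOf resp q1) = some "NO"
    · have hb1b : (pvEvalResp (pvRespOf resp q1) == some "NO") = true := by simp [hb1]
      cases hF2 : List.filter (fun q => get_gate_for_question q ml == some "CONTROL_OPERABLE") sq with
      | nil =>
        rw [hF2] at hc2 hd2 hf2
        cases hF3 : List.filter (fun q => get_gate_for_question q ml == some "CONTROL_RESILIENCE") sq with
        | nil =>
          rw [hF3] at hc3 hd3 hf3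
          simp only [pvA_gate, pvB_gate, hc1, hc2, hc3, hd1, hd2, hd3, hf1, hf2, hf3, pvB_branches, PySem.Dict.getD_insert, PySem.Dict.getD_empty, List.head?_cons, List.head?_nil, List.isEmpty_cons, List.isEmpty_nil, Bool.not_true, Bool.not_false, reduceIte, String.reduceEq, true_and, and_true, false_and, and_false, if_true, if_false, or_false, false_or, true_or, or_true, eq_self_iff_true, reduceCtorEq, Option.some.injEq, hb1, hb1b]
          try simp_all [PySem.Dict.getD_insert, PySem.Dict.getD_empty]
        | cons q3 t3 =>
          rw [hF3] at hc3 hd3 hf3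
          simp only [pvA_gate, pvB_gate, hc1, hc2, hc3, hd1, hd2, hd3, hf1, hf2, hf3, pvB_branches, PySem.Dict.getD_insert, PySem.Dict.getD_empty, List.head?_cons, List.head?_nil, List.isEmpty_cons, List.isEmpty_nil, Bool.not_true, Bool.not_false, reduceIte, String.reduceEq, true_and, and_true, false_and, and_false, if_true, if_false, or_false, false_or, true_or, or_true, eq_self_iff_true, reduceCtorEq, Option.some.injEq, hb1, hb1b]
          try simp_all [PySem.Dict.getD_insert, PySem.Dict.getD_empty]
      | cons q2 t2 =>
        rw [hF2] at hc2 hd2 hf2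
        by_cases hb2 : pvEvalResp (pvRespOf resp q2) = some "NO"
        · have hb2b : (pvEvalResp (pvRespOf resp q2) == some "NO") = true := by simp [hb2]
          cases hF3 : List.filter (fun q => get_gate_for_question q ml == some "CONTROL_RESILIENCE") sq with
          | nil =>
            rw [hF3] at hc3 hd3 hf3
            simp only [pvA_gate, pvB_gate, hc1, hc2, hc3, hd1, hd2, hd3, hf1, hf2, hf3, pvB_branches, PySem.Dict.getD_insert, PySem.Dict.getD_empty, List.head?_cons, List.head?_nil, List.isEmpty_cons, List.isEmpty_nil, Bool.not_true, Bool.not_false, reduceIte, String.reduceEq, true_and, and_true, false_and, and_false, if_true, if_false, or_false, false_or, true_or, or_true, eq_self_iff_true, reduceCtorEq, Option.some.injEq, hb1, hb1b, hb2, hb2b]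
            try simp_all [PySem.Dict.getD_insert, PySem.Dict.getD_empty]
          | cons q3 t3 =>
            rw [hF3] at hc3 hd3 hf3
            simp only [pvA_gate, pvB_gate, hc1, hc2, hc3, hd1, hd2, hd3, hf1, hf2, hf3, pvB_branches, PySem.Dict.getD_insert, PySem.Dict.getD_empty, List.head?_cons, List.head?_nil, List.isEmpty_cons, List.isEmpty_nil, Bool.not_true, Bool.not_false, reduceIte, String.reduceEq, true_and, and_true, false_and, and_false, if_true, if_false, or_false, false_or, true_or, or_true, eq_self_iff_true, reduceCtorEq, Option.some.injEq, hb1, hb1b, hb2, hb2b]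
            try simp_all [PySem.Dict.getD_insert, PySem.Dict.getD_empty]
        · have hb2b : (pvEvalResp (pvRespOf resp q2) == some "NO") = false := by simp [hb2]
          cases hF3 : List.filter (fun q => get_gate_for_question q ml == some "CONTROL_RESILIENCE") sq with
          | nil =>
            rw [hF3] at hc3 hd3 hf3
            simp only [pvA_gate, pvB_gate, hc1, hc2, hc3, hd1, hd2, hd3, hf1, hf2, hf3, pvB_branches, PySem.Dict.getD_insert, PySem.Dict.getD_empty, List.head?_cons, List.head?_nil, List.isEmpty_cons, List.isEmpty_nil, Bool.not_true, Bool.not_false, reduceIte, String.reduceEq, true_and, and_true, false_and, and_false, if_true, if_false, or_false, false_or, true_or, or_true, eq_self_iff_true, reduceCtorEq, Option.some.injEq, hb1, hb1b, hb2, hb2b]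
            try simp_all [PySem.Dict.getD_insert, PySem.Dict.getD_empty]
          | cons q3 t3 =>
            rw [hF3] at hc3 hd3 hf3
            simp only [pvA_gate, pvB_gate, hc1, hc2, hc3, hd1, hd2, hd3, hf1, hf2, hf3, pvB_branches, PySem.Dict.getD_insert, PySem.Dict.getD_empty, List.head?_cons, List.head?_nil, List.isEmpty_cons, List.isEmpty_nil, Bool.not_true, Bool.not_false, reduceIte, String.reduceEq, true_and, and_true, false_and, and_false, if_true, if_false, or_false, false_or, true_or, or_true, eq_self_iff_true, reduceCtorEq, Option.some.injEq, hb1, hb1b, hb2, hb2b]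
            try simp_all [PySem.Dict.getD_insert, PySem.Dict.getD_empty]
    · have hb1b : (pvEvalResp (pvRespOf resp q1) == some "NO") = false := by simp [hb1]
      cases hF2 : List.filter (fun q => get_gate_for_question q ml == some "CONTROL_OPERABLE") sq with
      | nil =>
        rw [hF2] at hc2 hd2 hf2
        cases hF3 : List.filter (fun q => get_gate_for_question q ml == some "CONTROL_RESILIENCE") sq with
        | nil =>
          rw [hF3] at hc3 hd3 hf3
          simp only [pvA_gate, pvB_gate, hc1, hc2, hc3, hd1, hd2, hd3, hf1, hf2, hf3, pvB_branches, PySem.Dict.getD_insert, PySem.Dict.getD_empty, List.head?_cons, List.head?_nil, List.isEmpty_cons, List.isEmpty_nil, Bool.not_true, Bool.not_false, reduceIte, String.reduceEq, true_and, and_true, false_and, and_false, if_true, if_false, or_false, false_or, true_or, or_true, eq_self_iff_true, reduceCtorEq, Option.some.injEq, hb1, hb1b]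
          try simp_all [PySem.Dict.getD_insert, PySem.Dict.getD_empty]
        | cons q3 t3 =>
          rw [hF3] at hc3 hd3 hf3
          simp only [pvA_gate, pvB_gate, hc1, hc2, hc3, hd1, hd2, hd3, hf1, hf2, hf3, pvB_branches, PySem.Dict.getD_insert, PySem.Dict.getD_empty, List.head?_cons, List.head?_nil, List.isEmpty_cons, List.isEmpty_nil, Bool.not_true, Bool.not_false, reduceIte, String.reduceEq, true_and, and_true, false_and, and_false, if_true, if_false, or_false, false_or, true_or, or_true, eq_self_iff_true, reduceCtorEq, Option.some.injEq, hb1, hb1b]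
          try simp_all [PySem.Dict.getD_insert, PySem.Dict.getD_empty]
      | cons q2 t2 =>
        rw [hF2] at hc2 hd2 hf2
        by_cases hb2 : pvEvalResp (pvRespOf resp q2) = some "NO"
        · have hb2b : (pvEvalResp (pvRespOf resp q2) == some "NO") = true := by simp [hb2]
          cases hF3 : List.filter (fun q => get_gate_for_question q ml == some "CONTROL_RESILIENCE") sq with
          | nil =>
            rw [hF3] at hc3 hd3 hf3
            simp only [pvA_gate, pvB_gate, hc1, hc2, hc3, hd1, hd2, hd3, hf1, hf2, hf3, pvB_branches, PySem.Dict.getD_insert, PySem.Dict.getD_empty, List.head?_cons, List.head?_nil, List.isEmpty_cons, List.isEmpty_nil, Bool.not_true, Bool.not_false, reduceIte, String.reduceEq, true_and, and_true, false_and, and_false, if_true, if_false, or_false, false_or, true_or, or_true, eq_self_iff_true, reduceCtorEq, Option.some.injEq, hb1, hb1b, hb2, hb2b]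
            try simp_all [PySem.Dict.getD_insert, PySem.Dict.getD_empty]
          | cons q3 t3 =>
            rw [hF3] at hc3 hd3 hf3
            simp only [pvA_gate, pvB_gate, hc1, hc2, hc3, hd1, hd2, hd3, hf1, hf2, hf3, pvB_branches, PySem.Dict.getD_insert, PySem.Dict.getD_empty, List.head?_cons, List.head?_nil, List.isEmpty_cons, List.isEmpty_nil, Bool.not_true, Bool.not_false, reduceIte, String.reduceEq, true_and, and_true, false_and, and_false, if_true, if_false, or_false, false_or, true_or, or_true, eq_self_iff_true, reduceCtorEq, Option.some.injEq, hb1, hb1b, hb2, hb2b]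
            try simp_all [PySem.Dict.getD_insert, PySem.Dict.getD_empty]
        · have hb2b : (pvEvalResp (pvRespOf resp q2) == some "NO") = false := by simp [hb2]
          cases hF3 : List.filter (fun q => get_gate_for_question q ml == some "CONTROL_RESILIENCE") sq with
          | nil =>
            rw [hF3] at hc3 hd3 hf3
            simp only [pvA_gate, pvB_gate, hc1, hc2, hc3, hd1, hd2, hd3, hf1, hf2, hf3, pvB_branches, PySem.Dict.getD_insert, PySem.Dict.getD_empty, List.head?_cons, List.head?_nil, List.isEmpty_cons, List.isEmpty_nil, Bool.not_true, Bool.not_false, reduceIte, String.reduceEq, true_and, and_true, false_and, and_false, if_true, if_false, or_false, false_or, true_or, or_true, eq_self_iff_true, reduceCtorEq, Option.some.injEq, hb1, hb1b, hb2, hb2b]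
            try simp_all [PySem.Dict.getD_insert, PySem.Dict.getD_empty]
          | cons q3 t3 =>
            rw [hF3] at hc3 hd3 hf3
            simp only [pvA_gate, pvB_gate, hc1, hc2, hc3, hd1, hd2, hd3, hf1, hf2, hf3, pvB_branches, PySem.Dict.getD_insert, PySem.Dict.getD_empty, List.head?_cons, List.head?_nil, List.isEmpty_cons, List.isEmpty_nil, Bool.not_true, Bool.not_false, reduceIte, String.reduceEq, true_and, and_true, false_and, and_false, if_true, if_false, or_false, false_or, true_or, or_true, eq_self_iff_true, reduceCtorEq, Option.some.injEq, hb1, hb1b, hb2, hb2b]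
            try simp_all [PySem.Dict.getD_insert, PySem.Dict.getD_empty]
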